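-- pv_equiv track=rewrite | github.com/rvakhrenev-kisi/cv_research_2 | people-counting/simple_parameter_tuning.py | parse_batch_output
-- ===== SOURCE A (Python) =====
-- from typing import Dict, List
--
-- def parse_batch_output(output: str) -> Dict:
--     """Parse batch detection output to extract counts"""
--     results = {"cisco": {}, "vortex": {}}
--
--     # Look for patterns like "cisco_1.mp4" and "Total: X"
--     lines = output.split('\n')
--     current_video = None
--
--     for line in lines:
--         if "Processing:" in line and "cisco" in line:
--             # Extract video name
--             if "cisco_" in line:
--                 video_name = line.split("cisco_")[1].split(".")[0]
--                 current_video = f"cisco_{video_name}"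
--         elif "Processing:" in line and "vortex" in line:
--             if "vortex_" in line:
--                 video_name = line.split("vortex_")[1].split(".")[0]
--                 current_video = f"vortex_{video_name}"
--         elif "Total:" in line and current_video:
--             # Extract count
--             try:
--                 count = int(line.split("Total:")[1].strip())
--                 dataset = current_video.split("_")[0]
--                 video_id = current_video.split("_")[1]
--
--                 if dataset not in results:
--                     results[dataset] = {}
--                 results[dataset][video_id] = {"total_count": count}
--                 current_video = None
--             except:
--                 pass
--
--     return results
-- ===== SOURCE B (Python) =====
-- def parse_batch_output(output: str):
--     """Parse batch detection output to extract counts.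
--     Staged decomposition: classify lines into an event list, then consume it
--     segment-by-segment (each Processing event followed by its run of Total
--     payloads), taking the first parseable count of each segment."""
--
--     def classify(line):
--         # (True, video) for a Processing line of a known dataset,
--         # (False, payload) for a Total line, None otherwise.
--         if "Processing:" in line:
--             for ds in ("cisco", "vortex"):
--                 if ds in line:
--                     tag = ds + "_"
--                     if tag in line:
--                         return (True, ds + "_" + line.split(tag)[1].split(".")[0])
--                     return None
--         if "Total:" in line:
--             return (False, line.split("Total:")[1])
--         return None
--
--     events = [e for e in map(classify, output.split('\n')) if e is not None]
--
--     results = {"cisco": {}, "vortex": {}}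
--     while events:
--         (is_set, payload), events = events[0], events[1:]
--         if not is_set:
--             continue
--         # the segment of Total payloads belonging to this Processing event
--         k = 0
--         while k < len(events) and not events[k][0]:
--             k += 1
--         segment, events = events[:k], events[k:]
--         for _, p in segment:
--             try:
--                 count = int(p.strip())
--             except ValueError:
--                 continue
--             ds, vid = payload.split("_")[0], payload.split("_")[1]
--             results.setdefault(ds, {})[vid] = {"total_count": count}
--             break
--     return results
-- ===== Notes on version B (the rewrite author's own statement) =====
-- stated objective: alternative
-- what changed: Replaces A's single stateful line scan (pending current_video threaded through the loop) with a staged decomposition: classify every line into an event list, then consume the events segment-wise, pairing each Processing event with the first parseable Total payload in its following run, with no pending variable across iterations.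
import Mathlib
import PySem

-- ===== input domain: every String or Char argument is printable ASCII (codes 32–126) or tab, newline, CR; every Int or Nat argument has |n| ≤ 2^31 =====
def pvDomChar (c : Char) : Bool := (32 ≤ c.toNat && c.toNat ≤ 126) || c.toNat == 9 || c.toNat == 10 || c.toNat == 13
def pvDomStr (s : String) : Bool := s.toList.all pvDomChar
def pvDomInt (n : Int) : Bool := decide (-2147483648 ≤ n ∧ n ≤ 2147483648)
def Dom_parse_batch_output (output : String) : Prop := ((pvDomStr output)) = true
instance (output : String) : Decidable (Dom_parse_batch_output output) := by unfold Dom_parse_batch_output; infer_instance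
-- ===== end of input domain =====

-- B replaces A's single stateful line scan by a staged decomposition (classify lines into an
-- event list, then consume it segment-by-segment); objective: alternative, same cost.

-- ===== PORT A =====
-- s.split(sep) for a nonempty literal sep: split? is some there, so getD is exact
def pvSplit (s sep : String) : List String := (PySem.Str.split? s sep).getD [s]

-- state = (results, current_video); list indices [1]/[0] after a split are guarded by the
-- corresponding isIn check, so they cannot raise and getD is exact.
def pvStepA (st : PySem.Dict String (PySem.Dict String (PySem.Dict String Int)) × Option String)
    (line : String) :
    PySem.Dict String (PySem.Dict String (PySem.Dict String Int)) × Option String :=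
  if PySem.Str.isIn "Processing:" line && PySem.Str.isIn "cisco" line then
    if PySem.Str.isIn "cisco_" line then
      let video_name := (pvSplit ((pvSplit line "cisco_").getD 1 "") ".").getD 0 ""
      (st.1, some ("cisco_" ++ video_name))
    else st
  else if PySem.Str.isIn "Processing:" line && PySem.Str.isIn "vortex" line then
    if PySem.Str.isIn "vortex_" line then
      let video_name := (pvSplit ((pvSplit line "vortex_").getD 1 "") ".").getD 0 ""
      (st.1, some ("vortex_" ++ video_name))
    else st
  else if PySem.Str.isIn "Total:" line && st.2.isSome then
    match st.2 with
    | none => st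
    | some cv =>
      -- try: only int() can raise here; except leaves the state unchanged
      match PySem.Int.ofStr? (PySem.Str.strip ((pvSplit line "Total:").getD 1 "")) with
      | none => st
      | some count =>
        let dataset := (pvSplit cv "_").getD 0 ""
        let video_id := (pvSplit cv "_").getD 1 ""
        let results := if st.1.contains dataset then st.1 else st.1.insert dataset PySem.Dict.empty
        (results.insert dataset ((results.getD dataset PySem.Dict.empty).insert video_id
          ((PySem.Dict.empty : PySem.Dict String Int).insert "total_count" count)), none)
  else st

def parse_batch_output (output : String) : List (String × List (String × List (String × Int))) :=
  let init : PySem.Dict String (PySem.Dict String (PySem.Dict String Int)) :=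
    (PySem.Dict.empty.insert "cisco" PySem.Dict.empty).insert "vortex" PySem.Dict.empty
  let fin := (pvSplit output "\n").foldl pvStepA (init, none)
  fin.1.items.map (fun p => (p.1, p.2.items.map (fun q => (q.1, q.2.items))))

-- ===== PORT B =====
-- the body of B's classify for-loop for one dataset name
def pvVideoTag (ds line : String) : Option (Bool × String) :=
  if PySem.Str.isIn (ds ++ "_") line then
    some (true, ds ++ "_" ++ (pvSplit ((pvSplit line (ds ++ "_")).getD 1 "") ".").getD 0 "")
  else none

-- classify: (true, video) for a Processing line of a known dataset, (false, payload) for a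
-- Total line, none otherwise; the for-loop over ("cisco","vortex") is a findSome?
def pvClassify (line : String) : Option (Bool × String) :=
  match (if PySem.Str.isIn "Processing:" line then
           ["cisco", "vortex"].findSome? (fun ds =>
             if PySem.Str.isIn ds line then some (pvVideoTag ds line) else none)
         else none) with
  | some ev => ev
  | none =>
    if PySem.Str.isIn "Total:" line then some (false, (pvSplit line "Total:").getD 1 "")
    else none

-- results.setdefault(ds, {})[vid] = {"total_count": count}
def pvRecord (r : PySem.Dict String (PySem.Dict String (PySem.Dict String Int)))
    (video : String) (count : Int) :
    PySem.Dict String (PySem.Dict String (PySem.Dict String Int)) :=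
  let ds := (pvSplit video "_").getD 0 ""
  let vid := (pvSplit video "_").getD 1 ""
  let r' := r.setdefault ds PySem.Dict.empty
  r'.insert ds ((r'.getD ds PySem.Dict.empty).insert vid
    ((PySem.Dict.empty : PySem.Dict String Int).insert "total_count" count))

-- consume the event list segment-by-segment: each set event takes the run of total payloads
-- after it (events[:k] / events[k:] = takeWhile / dropWhile) and records the first parseable one
def pvGroup (events : List (Bool × String))
    (r : PySem.Dict String (PySem.Dict String (PySem.Dict String Int))) :
    PySem.Dict String (PySem.Dict String (PySem.Dict String Int)) :=
  match events with
  | [] => r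
  | (false, _) :: rest => pvGroup rest r
  | (true, video) :: rest =>
    let segment := rest.takeWhile (fun e => !e.1)
    let r' := match segment.findSome? (fun e => PySem.Int.ofStr? (PySem.Str.strip e.2)) with
      | none => r
      | some count => pvRecord r video count
    pvGroup (rest.dropWhile (fun e => !e.1)) r'
termination_by events.length
decreasing_by simp; exact Nat.lt_succ_of_le (List.length_dropWhile_le _ _)

def parse_batch_output_alt (output : String) : List (String × List (String × List (String × Int))) :=
  let events := (pvSplit output "\n").filterMap pvClassify
  let init : PySem.Dict String (PySem.Dict String (PySem.Dict String Int)) :=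
    (PySem.Dict.empty.insert "cisco" PySem.Dict.empty).insert "vortex" PySem.Dict.empty
  (pvGroup events init).items.map (fun p => (p.1, p.2.items.map (fun q => (q.1, q.2.items))))

-- ===== PRECONDITION & SPEC =====
def Spec_parse_batch_output (output : String) (out : List (String × List (String × List (String × Int)))) : Prop := out = parse_batch_output_alt output
instance (output : String) (out : List (String × List (String × List (String × Int)))) : Decidable (Spec_parse_batch_output output out) := by unfold Spec_parse_batch_output; infer_instance

-- ===== CLAIM (what is proved, stated in full; the proofs are below) =====
def Claim_equal_parse_batch_output : Prop := ∀ (output : String), Dom_parse_batch_output output → Spec_parse_batch_output output (parse_batch_output output)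

-- ===== LEMMAS AND PROOFS =====

-- proof-side bridge: A's per-line step, seen on B's event alphabet
def pvEventStep (st : PySem.Dict String (PySem.Dict String (PySem.Dict String Int)) × Option String)
    (ev : Bool × String) :
    PySem.Dict String (PySem.Dict String (PySem.Dict String Int)) × Option String :=
  if ev.1 then (st.1, some ev.2)
  else match st.2 with
    | none => st
    | some cv =>
      match PySem.Int.ofStr? (PySem.Str.strip ev.2) with
      | none => st
      | some count =>
        let dataset := (pvSplit cv "_").getD 0 ""
        let video_id := (pvSplit cv "_").getD 1 ""
        let results := if st.1.contains dataset then st.1 else st.1.insert dataset PySem.Dict.empty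
        (results.insert dataset ((results.getD dataset PySem.Dict.empty).insert video_id
          ((PySem.Dict.empty : PySem.Dict String Int).insert "total_count" count)), none)

-- one step of A equals classify-then-eventStep on the same line
set_option maxHeartbeats 4000000 in
theorem pvStep_eq (st : PySem.Dict String (PySem.Dict String (PySem.Dict String Int)) × Option String)
    (line : String) :
    pvStepA st line = (pvClassify line).elim st (pvEventStep st) := by
  by_cases hP : PySem.Str.isIn "Processing:" line = true <;>
  by_cases hC : PySem.Str.isIn "cisco" line = true <;>
  by_cases hCu : PySem.Str.isIn "cisco_" line = true <;>
  by_cases hV : PySem.Str.isIn "vortex" line = true <;>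
  by_cases hVu : PySem.Str.isIn "vortex_" line = true <;>
  by_cases hT : PySem.Str.isIn "Total:" line = true <;>
  cases hs : st.2 <;>
  simp at hP hC hCu hV hVu hT <;>
  simp [pvStepA, pvClassify, pvVideoTag, pvEventStep, List.findSome?, hP, hC, hCu, hV, hVu, hT, hs]

theorem pvFold_filterMap (lines : List String)
    (st : PySem.Dict String (PySem.Dict String (PySem.Dict String Int)) × Option String) :
    (lines.filterMap pvClassify).foldl pvEventStep st = lines.foldl pvStepA st := by
  induction lines generalizing st with
  | nil => rfl
  | cons l ls ih =>
    have h := pvStep_eq st l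
    cases hc : pvClassify l with
    | none =>
        rw [hc, Option.elim_none] at h
        simp only [List.filterMap_cons, hc]
        rw [List.foldl_cons, h]
        exact ih st
    | some e =>
        rw [hc, Option.elim_some] at h
        simp only [List.filterMap_cons, hc]
        rw [List.foldl_cons, List.foldl_cons, h]
        exact ih (pvEventStep st e)

-- A's contains/insert dance is pvRecord
theorem pvEventStep_total (r : PySem.Dict String (PySem.Dict String (PySem.Dict String Int)))
    (cv p : String) (count : Int)
    (hp : PySem.Int.ofStr? (PySem.Str.strip p) = some count) :
    pvEventStep (r, some cv) (false, p) = (pvRecord r cv count, none) := by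
  unfold pvEventStep pvRecord
  rw [if_neg (by simp : ¬ ((false, p).1 = true))]
  simp only [hp]
  by_cases hc : r.contains ((pvSplit cv "_").getD 0 "") = true
  · rw [if_pos hc, PySem.Dict.setdefault_of_contains _ _ hc]
  · rw [if_neg hc, PySem.Dict.setdefault_of_not_contains _ _ (Bool.eq_false_iff.mpr hc)]

-- pvGroup skips leading total events
theorem pvGroup_dropWhile (evs : List (Bool × String))
    (r : PySem.Dict String (PySem.Dict String (PySem.Dict String Int))) :
    pvGroup (evs.dropWhile (fun e => !e.1)) r = pvGroup evs r := by
  induction evs with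
  | nil => rfl
  | cons e tl ih =>
    obtain ⟨b, p⟩ := e
    cases b with
    | false => rw [List.dropWhile_cons]; simpa [pvGroup] using ih
    | true => rw [List.dropWhile_cons]; simp

-- the heart: segment-wise consumption equals A's stateful fold
theorem pvGroup_eq_foldl (evs : List (Bool × String)) :
    (∀ r, pvGroup evs r = (evs.foldl pvEventStep (r, none)).1) ∧
    (∀ r cv, pvGroup ((true, cv) :: evs) r = (evs.foldl pvEventStep (r, some cv)).1) := by
  induction evs with
  | nil =>
    refine ⟨fun r => by simp [pvGroup], fun r cv => by simp [pvGroup]⟩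
  | cons e tl ih =>
    obtain ⟨ih1, ih2⟩ := ih
    obtain ⟨b, p⟩ := e
    refine ⟨fun r => ?_, fun r cv => ?_⟩
    · cases b with
      | true =>
        rw [List.foldl_cons, show pvEventStep (r, none) (true, p) = (r, some p) from rfl]
        exact ih2 r p
      | false =>
        rw [List.foldl_cons, show pvEventStep (r, none) (false, p) = (r, none) from rfl,
          show pvGroup ((false, p) :: tl) r = pvGroup tl r from by simp [pvGroup]]
        exact ih1 r
    · cases b with
      | true =>
        rw [show pvGroup ((true, cv) :: (true, p) :: tl) r = pvGroup ((true, p) :: tl) r from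
          by simp [pvGroup]]
        rw [List.foldl_cons, show pvEventStep (r, some cv) (true, p) = (r, some p) from rfl]
        exact ih2 r p
      | false =>
        cases hp : PySem.Int.ofStr? (PySem.Str.strip p) with
        | none =>
          have hL : pvGroup ((true, cv) :: (false, p) :: tl) r = pvGroup ((true, cv) :: tl) r := by
            simp [pvGroup, hp]
          have hstep : pvEventStep (r, some cv) (false, p) = (r, some cv) := by
            unfold pvEventStep; simp [hp]
          rw [hL, List.foldl_cons, hstep]
          exact ih2 r cv
        | some count =>
          have hL : pvGroup ((true, cv) :: (false, p) :: tl) r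
              = pvGroup (tl.dropWhile (fun e => !e.1)) (pvRecord r cv count) := by
            simp [pvGroup, hp]
          rw [hL, pvGroup_dropWhile, List.foldl_cons, pvEventStep_total r cv p count hp]
          exact ih1 (pvRecord r cv count)

-- ===== VERDICT (by name: the statement is the Claim_ definition above) =====
theorem parse_batch_output_spec : Claim_equal_parse_batch_output := by
  intro output _
  unfold Spec_parse_batch_output parse_batch_output parse_batch_output_alt
  dsimp only
  rw [(pvGroup_eq_foldl _).1, pvFold_filterMap]
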